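-- pv_equiv track=rewrite | github.com/karpovall/tasks_students | 03.1.FunctionsStringsIO/count_util/count_util.py | count_util
-- ===== SOURCE A (Python) =====
-- import typing as tp
--
-- def count_util(text: str, flags: tp.Optional[str] = None) -> dict[str, int]:
--     """
--     :param text: text to count entities
--     :param flags: flags in command-like format - can be:
--         * -m stands for counting characters
--         * -l stands for counting lines
--         * -L stands for getting length of the longest line
--         * -w stands for counting words
--     More than one flag can be passed at the same time, for example:
--         * "-l -m"
--         * "-lLw"
--     Ommiting flags or passing empty string is equivalent to "-mlLw"
--     :return: mapping from string keys to corresponding counter, where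
--     keys are selected according to the received flags:
--         * "chars" - amount of characters
--         * "lines" - amount of lines
--         * "longest_line" - the longest line length
--         * "words" - amount of words
--     """
--
--     a, b, c, d = 0, 0, 0, 0
--     a = text.count("\n")
--     x = 0
--     if text:
--         if text[0] != ' ' and text[0] != '\n':
--             b = 1
--     for i in range(len(text) - 1):
--         if text[i + 1] != ' ' and text[i + 1] != '\n' and (text[i] == ' ' or text[i] == '\n'):
--             b += 1
--     c = len(text)
--     for i in range(len(text)):
--         if text[i] != '\n':
--             x += 1
--         else:
--             x = 0
--         if x > d:
--             d = x
--     t: dict[str, int] = {}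
--     if flags is None or 'm' in flags or not flags:
--         t['chars'] = c
--     if flags is None or 'l' in flags or not flags:
--         t['lines'] = a
--     if flags is None or 'L' in flags or not flags:
--         t['longest_line'] = d
--     if flags is None or 'w' in flags or not flags:
--         t['words'] = b
--     return t
-- ===== SOURCE B (Python) =====
-- import typing as tp
--
-- def count_util(text: str, flags: tp.Optional[str] = None) -> dict[str, int]:
--     counts = {
--         'chars': len(text),
--         'lines': text.count('\n'),
--         'longest_line': max(len(line) for line in text.split('\n')),
--         'words': len([w for w in text.replace('\n', ' ').split(' ') if w]),
--     }
--     if flags is None or flags == '':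
--         return counts
--     letters = {'chars': 'm', 'lines': 'l', 'longest_line': 'L', 'words': 'w'}
--     return {k: v for k, v in counts.items() if letters[k] in flags}
-- ===== Notes on version B (the rewrite author's own statement) =====
-- stated objective: simpler
-- what changed: Replaces the three stateful index loops (the char-by-char word-boundary transition counter and the running longest-line counter) by whole-string operations - a newline count, a max over the split-into-lines lengths, and tokenize-by-replacing-newlines-then-split-then-filter for words - and replaces the four conditional dict inserts by building all four counters once and filtering them through a key-to-flag-letter table.
import Mathlib
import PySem

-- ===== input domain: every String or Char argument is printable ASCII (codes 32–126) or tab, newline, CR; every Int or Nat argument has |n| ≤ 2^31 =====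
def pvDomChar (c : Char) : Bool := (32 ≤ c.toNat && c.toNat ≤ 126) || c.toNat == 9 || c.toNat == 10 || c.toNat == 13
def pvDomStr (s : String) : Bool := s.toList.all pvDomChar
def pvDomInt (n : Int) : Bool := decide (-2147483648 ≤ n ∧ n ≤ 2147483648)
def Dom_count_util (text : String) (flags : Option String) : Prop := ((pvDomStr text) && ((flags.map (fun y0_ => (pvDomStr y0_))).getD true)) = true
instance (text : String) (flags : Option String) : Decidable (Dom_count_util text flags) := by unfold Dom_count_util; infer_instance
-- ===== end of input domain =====

-- B replaces A's three stateful index loops by string operations (count/split/replace/max)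
-- and the four conditional dict inserts by a build-all-then-filter-by-flag step: objective 'simpler'.

-- ===== PORT A =====
-- 'flags is None or f in flags or not flags'
def pvAWant (flags : Option String) (f : String) : Bool :=
  match flags with
  | none => true
  | some s => PySem.Str.isIn f s || s == ""

def count_util (text : String) (flags : Option String) : List (String × Int) :=
  let cs := text.toList
  let a : Int := (PySem.Str.count text "\n" : Int)
  -- if text: if text[0] != ' ' and text[0] != '\n': b = 1
  let b0 : Int :=
    match cs with
    | [] => 0
    | ch :: _ => if ch ≠ ' ' ∧ ch ≠ '\n' then 1 else 0
  -- for i in range(len(text)-1): reads text[i], text[i+1] in order — the adjacent pairs of cs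
  let b : Int := (cs.zip cs.tail).foldl
      (fun b p => if p.2 ≠ ' ' ∧ p.2 ≠ '\n' ∧ (p.1 = ' ' ∨ p.1 = '\n') then b + 1 else b) b0
  let c : Int := (PySem.Str.len text : Int)
  -- for i in range(len(text)): reads text[i] in order — fold over cs with state (x, d)
  let xd : Int × Int := cs.foldl
      (fun xd ch =>
        let x := if ch ≠ '\n' then xd.1 + 1 else 0
        (x, if x > xd.2 then x else xd.2)) (0, 0)
  let d : Int := xd.2
  let t : PySem.Dict String Int := PySem.Dict.empty
  let t := if pvAWant flags "m" then t.insert "chars" c else t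
  let t := if pvAWant flags "l" then t.insert "lines" a else t
  let t := if pvAWant flags "L" then t.insert "longest_line" d else t
  let t := if pvAWant flags "w" then t.insert "words" b else t
  t.items

-- ===== PORT B =====
-- letters = {'chars': 'm', 'lines': 'l', 'longest_line': 'L', 'words': 'w'}
def pvBLetter (k : String) : String :=
  if k = "chars" then "m" else if k = "lines" then "l" else if k = "longest_line" then "L" else "w"

def count_util_alt (text : String) (flags : Option String) : List (String × Int) :=
  let cs := text.toList
  let counts : List (String × Int) :=
    [("chars", (PySem.Str.len text : Int)),
     ("lines", (PySem.Str.count text "\n" : Int)),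
     -- max(len(line) for line in text.split('\n')): split('\n') is never empty, so .getD 0 is a totality guard only
     ("longest_line", (PySem.List.max? ((PySem.Chars.splitOn cs ['\n']).map (fun l => (l.length : Int))) (fun x => x)).getD 0),
     ("words", (((PySem.Chars.splitOn (PySem.Chars.replace cs ['\n'] [' ']) [' ']).filter (fun w => w ≠ [])).length : Int))]
  match flags with
  | none => counts
  | some f => if f = "" then counts else counts.filter (fun kv => PySem.Str.isIn (pvBLetter kv.1) f)

-- ===== PRECONDITION & SPEC =====
def Spec_count_util (text : String) (flags : Option String) (out : List (String × Int)) : Prop := out = count_util_alt text flags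
instance (text : String) (flags : Option String) (out : List (String × Int)) : Decidable (Spec_count_util text flags out) := by unfold Spec_count_util; infer_instance

-- ===== CLAIM (what is proved, stated in full; the proofs are below) =====
def Claim_equal_count_util : Prop := ∀ (text : String) (flags : Option String), Dom_count_util text flags → Spec_count_util text flags (count_util text flags)

-- ===== LEMMAS AND PROOFS =====
def pvSplitCh (s : Char) (pre : List Char) : List Char → List (List Char)
  | [] => [pre]
  | c :: t => if c = s then pre :: pvSplitCh s [] t else pvSplitCh s (pre ++ [c]) t

theorem pv_go_single (s : Char) : ∀ (fuel : Nat) (l cur : List Char) (acc : List (List Char)) (_ : l.length ≤ fuel),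
    PySem.Chars.splitOn.go [s] fuel l cur acc = acc.reverse ++ pvSplitCh s cur.reverse l := by
  intro fuel
  induction fuel with
  | zero =>
    intro l cur acc h
    have : l = [] := List.length_eq_zero_iff.mp (Nat.le_zero.mp h)
    subst this
    simp [PySem.Chars.splitOn.go, pvSplitCh]
  | succ n ih =>
    intro l cur acc h
    cases l with
    | nil => simp [PySem.Chars.splitOn.go, pvSplitCh]
    | cons c t =>
      simp only [PySem.Chars.splitOn.go, List.isPrefixOf, List.isPrefixOf_nil_left, Bool.and_true]
      by_cases hc : s = c
      · subst hc
        simp only [beq_self_eq_true, if_pos, List.length_cons, List.length_nil, List.drop_succ_cons,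
          List.drop_zero]
        rw [ih t [] (cur.reverse :: acc) (by simpa using Nat.le_of_succ_le_succ h)]
        simp [pvSplitCh]
      · have : (s == c) = false := beq_eq_false_iff_ne.mpr hc
        simp only [this, if_neg Bool.false_ne_true]
        rw [ih t (c :: cur) acc (by simpa using Nat.le_of_succ_le_succ h)]
        simp [pvSplitCh, Ne.symm hc]

theorem pv_splitOn_single (s : Char) (cs : List Char) :
    PySem.Chars.splitOn cs [s] = pvSplitCh s [] cs := by
  have := pv_go_single s (cs.length + 1) cs [] [] (Nat.le_succ _)
  simpa [PySem.Chars.splitOn] using this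

theorem pv_replace_go (fuel : Nat) : ∀ (l acc : List Char) (_ : l.length ≤ fuel),
    PySem.Chars.replace.go ['\n'] [' '] fuel l acc
      = acc.reverse ++ l.map (fun c => if c = '\n' then ' ' else c) := by
  induction fuel with
  | zero =>
    intro l acc h
    have : l = [] := List.length_eq_zero_iff.mp (Nat.le_zero.mp h)
    subst this
    simp [PySem.Chars.replace.go]
  | succ n ih =>
    intro l acc h
    cases l with
    | nil => simp [PySem.Chars.replace.go]
    | cons c t =>
      simp only [PySem.Chars.replace.go, List.isPrefixOf, List.isPrefixOf_nil_left, Bool.and_true]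
      by_cases hc : '\n' = c
      · subst hc
        simp only [beq_self_eq_true, if_pos, List.length_cons, List.length_nil, List.drop_succ_cons,
          List.drop_zero]
        rw [show ([' '].reverse ++ acc : List Char) = ' ' :: acc from rfl, ih t (' ' :: acc) (by simpa using Nat.le_of_succ_le_succ h)]
        simp
      · have hb : ('\n' == c) = false := beq_eq_false_iff_ne.mpr hc
        simp only [hb, if_neg Bool.false_ne_true]
        rw [ih t (c :: acc) (by simpa using Nat.le_of_succ_le_succ h)]
        simp [Ne.symm hc]

theorem pv_replace_single (cs : List Char) :
    PySem.Chars.replace cs ['\n'] [' '] = cs.map (fun c => if c = '\n' then ' ' else c) := by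
  simpa [PySem.Chars.replace] using pv_replace_go cs.length cs [] le_rfl

def pvWC (p : Bool) : List Char → Int
  | [] => 0
  | c :: t => (if (c ≠ ' ' ∧ c ≠ '\n') ∧ p = true then 1 else 0) + pvWC (decide (c = ' ' ∨ c = '\n')) t

def pvWS (p : Bool) : List Char → Int
  | [] => 0
  | c :: t => (if c ≠ ' ' ∧ p = true then 1 else 0) + pvWS (decide (c = ' ')) t

theorem pv_zip_fold : ∀ (t : List Char) (c : Char) (acc : Int),
    ((c :: t).zip t).foldl
      (fun b p => if p.2 ≠ ' ' ∧ p.2 ≠ '\n' ∧ (p.1 = ' ' ∨ p.1 = '\n') then b + 1 else b) acc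
      = acc + pvWC (decide (c = ' ' ∨ c = '\n')) t := by
  intro t
  induction t with
  | nil => intro c acc; simp [pvWC]
  | cons c2 t2 ih =>
    intro c acc
    simp only [List.zip_cons_cons, List.foldl_cons, ih c2, pvWC]
    by_cases h1 : c2 ≠ ' ' ∧ c2 ≠ '\n'
    · by_cases h2 : c = ' ' ∨ c = '\n' <;> simp [h1, h2] <;> omega
    · rw [not_and_or, not_not, not_not] at h1
      rcases h1 with h | h <;> simp [h] <;> omega

theorem pv_wc_eq_ws : ∀ (l : List Char) (p : Bool),
    pvWS p (l.map (fun c => if c = '\n' then ' ' else c)) = pvWC p l := by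
  intro l
  induction l with
  | nil => intro p; simp [pvWS, pvWC]
  | cons c t ih =>
    intro p
    by_cases hn : c = '\n'
    · subst hn; simp [pvWS, pvWC, ih]
    · by_cases hs : c = ' ' <;> simp [pvWS, pvWC, hn, hs, ih]

theorem pv_tokens (l : List Char) : ∀ (pre : List Char),
    ((((pvSplitCh ' ' pre l).filter (fun a => !decide (a = []))).length : Int))
      = (if pre = [] then 0 else 1) + pvWS (decide (pre = [])) l := by
  induction l with
  | nil =>
    intro pre
    by_cases h : pre = [] <;> simp [pvSplitCh, pvWS, h]
  | cons c t ih =>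
    intro pre
    by_cases hs : c = ' '
    · subst hs
      have h2 := ih ([] : List Char)
      simp only [pvSplitCh, if_pos rfl, List.filter_cons, pvWS, if_neg (by simp : ¬(' ' ≠ ' ' ∧ True))]
      by_cases h : pre = [] <;> simp [h, pvWS] at h2 ⊢ <;> omega
    · have h2 := ih (pre ++ [c])
      simp only [pvSplitCh, if_neg hs, pvWS]
      by_cases h : pre = [] <;> simp [h, hs] at h2 ⊢ <;> omega

def pvMaxRun (x : Int) : List Char → Int
  | [] => x
  | c :: t => if c = '\n' then max x (pvMaxRun 0 t) else pvMaxRun (x + 1) t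

theorem pv_maxRun_ge : ∀ (l : List Char) (x : Int), x ≤ pvMaxRun x l := by
  intro l
  induction l with
  | nil => intro x; simp [pvMaxRun]
  | cons c t ih =>
    intro x
    by_cases h : c = '\n'
    · simp [pvMaxRun, h, le_max_left]
    · simp only [pvMaxRun, if_neg h]
      exact le_trans (by omega) (ih (x + 1))

def pvDStep (xd : Int × Int) (ch : Char) : Int × Int :=
  let x := if ch ≠ '\n' then xd.1 + 1 else 0
  (x, if x > xd.2 then x else xd.2)

theorem pv_afold : ∀ (l : List Char) (x d : Int), 0 ≤ x → x ≤ d →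
    (l.foldl pvDStep (x, d)).2 = max d (pvMaxRun x l) := by
  intro l
  induction l with
  | nil => intro x d h0 hxd; simp [pvMaxRun]; omega
  | cons c t ih =>
    intro x d h0 hxd
    rw [List.foldl_cons]
    by_cases h : c = '\n'
    · subst h
      rw [show pvDStep (x, d) '\n' = ((0 : Int), d) from by simp [pvDStep]; omega]
      rw [ih 0 d le_rfl (le_trans h0 hxd)]
      simp only [pvMaxRun, if_true, eq_self_iff_true]
      rw [← max_assoc, max_eq_left hxd]
    · rw [show pvDStep (x, d) c = (x + 1, if x + 1 > d then x + 1 else d) from by simp [pvDStep, h]]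
      have he : (if x + 1 > d then x + 1 else d) = max d (x + 1) := by
        rw [max_def]; split_ifs <;> omega
      rw [he, ih (x + 1) (max d (x + 1)) (by omega) (le_max_right d (x + 1))]
      simp only [pvMaxRun, if_neg h]
      rw [max_assoc, max_eq_right (pv_maxRun_ge t (x + 1))]

def pvMStep (acc : Option Int) (x : Int) : Option Int :=
  match acc with
  | none => some x
  | some m => if m < x then some x else some m

theorem pv_mstep_some : ∀ (ls : List Int) (m : Int), ls.foldl pvMStep (some m) = some (ls.foldl max m) := by
  intro ls
  induction ls with
  | nil => intro m; simp
  | cons x t ih =>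
    intro m
    simp only [List.foldl_cons]
    rw [show pvMStep (some m) x = some (max m x) from by
      simp only [pvMStep]
      rcases le_total x m with hl | hl
      · rw [if_neg (not_lt.mpr hl), max_eq_left hl]
      · rcases eq_or_lt_of_le hl with he | hl'
        · subst he; simp
        · rw [if_pos hl', max_eq_right hl]]
    exact ih (max m x)

theorem pv_lmax (l : List Char) : ∀ (pre : List Char) (m : Int),
    ((pvSplitCh '\n' pre l).map (fun a => (a.length : Int))).foldl max m
      = max m (pvMaxRun (pre.length : Int) l) := by
  induction l with
  | nil => intro pre m; simp [pvSplitCh, pvMaxRun]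
  | cons c t ih =>
    intro pre m
    by_cases h : c = '\n'
    · subst h
      simp only [pvSplitCh, if_pos rfl, List.map_cons, List.foldl_cons, pvMaxRun, if_true,
        eq_self_iff_true]
      rw [ih [] (max m pre.length)]
      simp only [List.length_nil, Nat.cast_zero, max_assoc]
    · simp only [pvSplitCh, if_neg h, pvMaxRun, ih (pre ++ [c]) m]
      have : ((pre ++ [c]).length : Int) = (pre.length : Int) + 1 := by simp
      rw [this]

theorem pv_bnone (l : List Char) : ∀ (pre : List Char),
    ((pvSplitCh '\n' pre l).map (fun a => (a.length : Int))).foldl pvMStep none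
      = some (pvMaxRun (pre.length : Int) l) := by
  induction l with
  | nil => intro pre; simp [pvSplitCh, pvMStep, pvMaxRun]
  | cons c t ih =>
    intro pre
    by_cases h : c = '\n'
    · subst h
      simp only [pvSplitCh, if_pos rfl, List.map_cons, List.foldl_cons, pvMaxRun, if_true,
        eq_self_iff_true]
      rw [show pvMStep none (pre.length : Int) = some (pre.length : Int) from rfl]
      rw [pv_mstep_some, pv_lmax]
      simp
    · simp only [pvSplitCh, if_neg h, pvMaxRun, ih (pre ++ [c])]
      have : ((pre ++ [c]).length : Int) = (pre.length : Int) + 1 := by simp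
      rw [this]

theorem pv_words_eq (cs : List Char) :
    ((cs.zip cs.tail).foldl
      (fun b p => if p.2 ≠ ' ' ∧ p.2 ≠ '\n' ∧ (p.1 = ' ' ∨ p.1 = '\n') then b + 1 else b)
      (match cs with
       | [] => (0 : Int)
       | ch :: _ => if ch ≠ ' ' ∧ ch ≠ '\n' then 1 else 0))
    = (((PySem.Chars.splitOn (PySem.Chars.replace cs ['\n'] [' ']) [' ']).filter (fun w => w ≠ [])).length : Int) := by
  rw [pv_replace_single, pv_splitOn_single]
  have ht := pv_tokens (cs.map (fun c => if c = '\n' then ' ' else c)) []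
  simp only [List.length_nil, decide_true, if_pos rfl] at ht
  have hpred : (fun (w : List Char) => decide ¬(w = [])) = (fun w => !decide (w = [])) := by
    funext w; simp [decide_not]
  rw [show (fun (w : List Char) => decide (w ≠ [])) = (fun w => !decide (w = [])) from hpred]
  rw [ht, pv_wc_eq_ws]
  cases cs with
  | nil => simp [pvWC]
  | cons c t =>
    simp only [List.tail_cons]
    rw [pv_zip_fold]
    simp only [pvWC, decide_true, and_true, if_true]
    by_cases h1 : c ≠ ' ' ∧ c ≠ '\n' <;> simp [h1] <;> omega

theorem pv_longest_eq (cs : List Char) :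
    (cs.foldl (fun xd ch =>
        let x := if ch ≠ '\n' then xd.1 + 1 else 0
        (x, if x > xd.2 then x else xd.2)) ((0 : Int), (0 : Int))).2
    = (PySem.List.max? ((PySem.Chars.splitOn cs ['\n']).map (fun l => (l.length : Int))) (fun x => x)).getD 0 := by
  show (cs.foldl pvDStep ((0 : Int), (0 : Int))).2 = _
  rw [pv_afold cs 0 0 le_rfl le_rfl, pv_splitOn_single]
  have hmax : ∀ (ls : List Int), PySem.List.max? ls (fun x => x) = ls.foldl pvMStep none := by
    intro ls
    rw [PySem.List.max?]
    apply List.foldl_ext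
    intro acc x _
    cases acc <;> rfl
  rw [hmax, pv_bnone cs []]
  simp only [List.length_nil, Nat.cast_zero, Option.getD_some]
  exact max_eq_right (pv_maxRun_ge cs 0)

-- ===== VERDICT (by name: the statement is the Claim_ definition above) =====
theorem count_util_spec : Claim_equal_count_util := by
  intro text flags _
  show count_util text flags = count_util_alt text flags
  simp only [count_util, count_util_alt]
  rw [pv_words_eq text.toList, pv_longest_eq text.toList]
  cases flags with
  | none => rfl
  | some f =>
    by_cases hf : f = ""
    · subst hf; rfl
    · have hne : (f == "") = false := beq_eq_false_iff_ne.mpr hf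
      simp only [pvAWant, hne, Bool.or_false, if_neg hf]
      by_cases hm : PySem.Chars.isIn ['m'] f.toList = true <;>
      by_cases hl : PySem.Chars.isIn ['l'] f.toList = true <;>
      by_cases hL : PySem.Chars.isIn ['L'] f.toList = true <;>
      by_cases hw : PySem.Chars.isIn ['w'] f.toList = true <;>
        simp [hm, hl, hL, hw, pvBLetter, List.filter, PySem.Dict.items_insert,
          PySem.Dict.contains_insert, PySem.Dict.contains_empty, PySem.Dict.items, PySem.Dict.empty]
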